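-- pv_equiv track=rewrite | github.com/genqiaolynn/sheet_resolve | sheet_adjust.py | get_white_blok_pos
-- ===== SOURCE A (Python) =====
-- def get_white_blok_pos(arry, blok_w=0):
--     """获取投影结果中的白色块"""
--     pos = []
--     start = 1
--     x0 = 0
--     x1 = 0
--     for idx, val in enumerate(arry):
--         if start:
--             if val:
--                 x0 = idx
--                 start = 0
--         else:
--             if 0 == val:
--                 x1 = idx
--                 start = 1
--                 if x1 - x0 > blok_w:
--                     pos.append((x0, x1))
--     if 0 == start:
--         x1 = len(arry) - 1
--         if x1 - x0 > blok_w: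
--             pos.append((x0, x1))
--     return pos
-- ===== SOURCE B (Python) =====
-- def get_white_blok_pos(arry, blok_w=0):
--     """Staged edge detection: shift-and-compare to find rising/falling edges,
--     then zip starts with ends and filter by width (no stateful scan)."""
--     n = len(arry)
--     shifted = [0] + arry[:-1]
--     starts = [i for i, (p, v) in enumerate(zip(shifted, arry)) if v and not p]
--     ends = [i for i, (p, v) in enumerate(zip(shifted, arry)) if p and not v]
--     if arry and arry[-1]:
--         ends.append(n - 1)
--     return [(x0, x1) for x0, x1 in zip(starts, ends) if x1 - x0 > blok_w]
-- ===== Notes on version B (the rewrite author's own statement) =====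
-- stated objective: alternative
-- what changed: Replaces A's per-element start-flag state machine with staged edge detection: a shifted copy of the array is zipped with it to list rising-edge (start) and falling-edge (end) indices in two comprehensions, which are then zipped pairwise and filtered by width.
import Mathlib
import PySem

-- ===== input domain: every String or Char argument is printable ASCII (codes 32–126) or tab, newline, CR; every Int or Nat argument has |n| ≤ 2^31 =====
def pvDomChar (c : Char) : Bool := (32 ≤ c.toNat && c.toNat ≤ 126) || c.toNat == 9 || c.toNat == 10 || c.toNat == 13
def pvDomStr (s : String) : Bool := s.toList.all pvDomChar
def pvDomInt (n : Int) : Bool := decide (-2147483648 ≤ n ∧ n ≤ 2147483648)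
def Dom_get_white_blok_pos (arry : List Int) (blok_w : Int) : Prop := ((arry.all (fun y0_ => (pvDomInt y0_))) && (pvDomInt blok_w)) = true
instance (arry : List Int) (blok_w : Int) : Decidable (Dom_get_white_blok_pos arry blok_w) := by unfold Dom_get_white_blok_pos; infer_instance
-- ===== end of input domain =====

-- B replaces A's start-flag state machine with staged edge detection (shifted zip, two edge
-- comprehensions, pairwise zip + width filter); alternative decomposition, same O(n) cost.


-- ===== PORT A =====
-- A's for-loop over enumerate(arry), with its state (pos, start, x0, x1), as structural recursion.
def aLoop (blok_w : Int) (pos : List (Int × Int)) (start : Bool) (x0 x1 idx : Int) :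
    List Int → (List (Int × Int) × Bool × Int × Int)
  | [] => (pos, start, x0, x1)
  | v :: rest =>
    if start then
      if v ≠ 0 then aLoop blok_w pos false idx x1 (idx + 1) rest
      else aLoop blok_w pos start x0 x1 (idx + 1) rest
    else
      if v = 0 then
        aLoop blok_w (if idx - x0 > blok_w then pos ++ [(x0, idx)] else pos) true x0 idx (idx + 1) rest
      else aLoop blok_w pos start x0 x1 (idx + 1) rest

def get_white_blok_pos (arry : List Int) (blok_w : Int) : List (Int × Int) :=
  let st := aLoop blok_w [] true 0 0 0 arry
  let pos := st.1
  let start := st.2.1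
  let x0 := st.2.2.1
  if start = false then
    let x1 := (arry.length : Int) - 1
    if x1 - x0 > blok_w then pos ++ [(x0, x1)] else pos
  else pos

-- ===== PORT B =====
-- B: shifted = [0] + arry[:-1]; starts/ends from enumerate(zip(shifted, arry)); zip + filter.
def get_white_blok_pos_alt (arry : List Int) (blok_w : Int) : List (Int × Int) :=
  let n : Int := (arry.length : Int)
  let shifted : List Int := 0 :: PySem.List.slice arry none (some (-1))
  let pairsPV := PySem.List.enumerate (shifted.zip arry) 0
  let starts := (pairsPV.filter (fun t => decide (t.2.2 ≠ 0 ∧ t.2.1 = 0))).map (·.1)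
  let ends0 := (pairsPV.filter (fun t => decide (t.2.1 ≠ 0 ∧ t.2.2 = 0))).map (·.1)
  let ends := if arry ≠ [] ∧ PySem.List.pyGetD arry (-1) 0 ≠ 0 then ends0 ++ [n - 1] else ends0
  (starts.zip ends).filter (fun p => decide (p.2 - p.1 > blok_w))

-- ===== PRECONDITION & SPEC =====
def Spec_get_white_blok_pos (arry : List Int) (blok_w : Int) (out : List (Int × Int)) : Prop := out = get_white_blok_pos_alt arry blok_w
instance (arry : List Int) (blok_w : Int) (out : List (Int × Int)) : Decidable (Spec_get_white_blok_pos arry blok_w out) := by unfold Spec_get_white_blok_pos; infer_instance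

-- ===== CLAIM (what is proved, stated in full; the proofs are below) =====
def Claim_equal_get_white_blok_pos : Prop := ∀ (arry : List Int) (blok_w : Int), Dom_get_white_blok_pos arry blok_w → Spec_get_white_blok_pos arry blok_w (get_white_blok_pos arry blok_w)

-- ===== LEMMAS AND PROOFS =====

-- recursive characterisations of B's two edge lists (prev = previous element, 0 initially)
def startsF (i prev : Int) : List Int → List Int
  | [] => []
  | v :: rest => (if v ≠ 0 ∧ prev = 0 then [i] else []) ++ startsF (i + 1) v rest

def endsF (n i prev : Int) : List Int → List Int
  | [] => if prev ≠ 0 then [n - 1] else []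
  | v :: rest => (if prev ≠ 0 ∧ v = 0 then [i] else []) ++ endsF n (i + 1) v rest

def pairsF (blok_w : Int) (s e : List Int) : List (Int × Int) :=
  (s.zip e).filter (fun p => decide (p.2 - p.1 > blok_w))

-- A's post-loop trailing-run fixup, with n = len(arry)
def finalize (blok_w n : Int) (st : List (Int × Int) × Bool × Int × Int) : List (Int × Int) :=
  if st.2.1 = false then
    if (n - 1) - st.2.2.1 > blok_w then st.1 ++ [(st.2.2.1, n - 1)] else st.1
  else st.1

theorem append_if_push (c : Prop) [Decidable c] (pos L : List (Int × Int)) (x : Int × Int) :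
    (if c then pos ++ [x] else pos) ++ L = pos ++ ((if c then [x] else []) ++ L) := by
  split <;> simp

theorem pairsF_cons (blok_w a b : Int) (s e : List Int) :
    pairsF blok_w (a :: s) (b :: e) =
      (if b - a > blok_w then [(a, b)] else []) ++ pairsF blok_w s e := by
  simp [pairsF]; split <;> simp_all

-- truncating zip ignores the dropped last element
theorem zip_shift : ∀ (l : List Int) (p : Int), (p :: l.dropLast).zip l = (p :: l).zip l := by
  intro l
  induction l with
  | nil => intro p; simp
  | cons v rest ih =>
    intro p
    cases rest with
    | nil => simp
    | cons w r =>
      have h1 : (p :: (v :: w :: r).dropLast).zip (v :: w :: r)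
          = (p, v) :: ((v :: (w :: r).dropLast).zip (w :: r)) := by
        rw [show (v :: w :: r).dropLast = v :: (w :: r).dropLast from by simp,
          List.zip_cons_cons]
      rw [h1, ih v]
      simp [List.zip_cons_cons]

-- the starts comprehension equals startsF
theorem starts_eq (l : List Int) : ∀ (p i : Int),
    ((PySem.List.enumerate ((p :: l).zip l) i).filter
        (fun t => decide (t.2.2 ≠ 0 ∧ t.2.1 = 0))).map (·.1) = startsF i p l := by
  induction l with
  | nil => intro p i; simp [startsF]
  | cons v rest ih =>
    intro p i
    rw [List.zip_cons_cons, PySem.List.enumerate_cons, List.filter_cons]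
    by_cases h : v ≠ 0 ∧ p = 0
    · rw [if_pos (by exact decide_eq_true h), List.map_cons, ih v (i + 1)]
      simp [startsF, h]
    · rw [if_neg (by simp [decide_eq_false h]), ih v (i + 1)]
      simp [startsF, h]

-- the ends comprehension (without the trailing fixup) plus fixup equals endsF
theorem ends_eq (l : List Int) : ∀ (p i n : Int),
    ((PySem.List.enumerate ((p :: l).zip l) i).filter
          (fun t => decide (t.2.1 ≠ 0 ∧ t.2.2 = 0))).map (·.1)
        ++ (if l.getLast?.getD p ≠ 0 then [n - 1] else []) = endsF n i p l := by
  induction l with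
  | nil => intro p i n; by_cases h : p ≠ 0 <;> simp [endsF, h]
  | cons v rest ih =>
    intro p i n
    have hlast : (v :: rest).getLast?.getD p = rest.getLast?.getD v := by
      cases rest <;> simp [List.getLast?]
    rw [List.zip_cons_cons, PySem.List.enumerate_cons, List.filter_cons, hlast]
    by_cases h : p ≠ 0 ∧ v = 0
    · rw [if_pos (by exact decide_eq_true h), List.map_cons, List.cons_append,
        ih v (i + 1) n]
      simp [endsF, h]
    · rw [if_neg (by simp [decide_eq_false h]), ih v (i + 1) n]
      simp [endsF, h]

-- joint invariant: A's two loop states against the zipped edge lists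
theorem aLoop_key (blok_w n : Int) (l : List Int) :
    (∀ pos x0 x1 i, n = i + (l.length : Int) →
      finalize blok_w n (aLoop blok_w pos true x0 x1 i l)
        = pos ++ pairsF blok_w (startsF i 0 l) (endsF n i 0 l)) ∧
    (∀ pos x0 x1 i prev, prev ≠ 0 → n = i + (l.length : Int) →
      finalize blok_w n (aLoop blok_w pos false x0 x1 i l)
        = pos ++ pairsF blok_w (x0 :: startsF i prev l) (endsF n i prev l)) := by
  induction l with
  | nil =>
    constructor
    · intro pos x0 x1 i hn
      simp [aLoop, finalize, startsF, endsF, pairsF]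
    · intro pos x0 x1 i prev hp hn
      have he : endsF n i prev [] = [n - 1] := by simp [endsF, hp]
      have hs : startsF i prev [] = [] := rfl
      simp only [aLoop, he, hs]
      rw [pairsF_cons]
      simp only [pairsF, List.zip_nil_left, List.filter_nil, List.append_nil]
      simp only [finalize]
      split_ifs with h1 <;> simp
  | cons v rest ih =>
    obtain ⟨ihT, ihF⟩ := ih
    constructor
    · intro pos x0 x1 i hn
      have hn' : n = (i + 1) + (rest.length : Int) := by
        simp only [List.length_cons] at hn; push_cast at hn ⊢; omega
      by_cases hv : v = 0
      · subst hv
        have hs : startsF i 0 ((0:Int) :: rest) = startsF (i + 1) 0 rest := by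
          simp [startsF]
        have he : endsF n i 0 ((0:Int) :: rest) = endsF n (i + 1) 0 rest := by
          simp [endsF]
        rw [show aLoop blok_w pos true x0 x1 i (0 :: rest)
              = aLoop blok_w pos true x0 x1 (i + 1) rest from by simp [aLoop],
          ihT pos x0 x1 (i + 1) hn', hs, he]
      · have hs : startsF i 0 (v :: rest) = i :: startsF (i + 1) v rest := by
          simp [startsF, hv]
        have he : endsF n i 0 (v :: rest) = endsF n (i + 1) v rest := by
          simp [endsF, hv]
        rw [show aLoop blok_w pos true x0 x1 i (v :: rest)
              = aLoop blok_w pos false i x1 (i + 1) rest from by simp [aLoop, hv],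
          ihF pos i x1 (i + 1) v hv hn', hs, he]
    · intro pos x0 x1 i prev hp hn
      have hn' : n = (i + 1) + (rest.length : Int) := by
        simp only [List.length_cons] at hn; push_cast at hn ⊢; omega
      by_cases hv : v = 0
      · subst hv
        have hs : startsF i prev ((0:Int) :: rest) = startsF (i + 1) 0 rest := by
          simp [startsF]
        have he : endsF n i prev ((0:Int) :: rest) = i :: endsF n (i + 1) 0 rest := by
          simp [endsF, hp]
        rw [show aLoop blok_w pos false x0 x1 i (0 :: rest)
              = aLoop blok_w (if i - x0 > blok_w then pos ++ [(x0, i)] else pos)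
                  true x0 i (i + 1) rest from by simp [aLoop],
          ihT (if i - x0 > blok_w then pos ++ [(x0, i)] else pos) x0 i (i + 1) hn',
          hs, he, pairsF_cons, append_if_push]
      · have hs : startsF i prev (v :: rest) = startsF (i + 1) v rest := by
          simp [startsF, hp]
        have he : endsF n i prev (v :: rest) = endsF n (i + 1) v rest := by
          simp [endsF, hv]
        rw [show aLoop blok_w pos false x0 x1 i (v :: rest)
              = aLoop blok_w pos false x0 x1 (i + 1) rest from by simp [aLoop, hv],
          ihF pos x0 x1 (i + 1) v hv hn', hs, he]

-- B's port unfolds to the zipped edge lists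
theorem alt_eq (arry : List Int) (blok_w : Int) :
    get_white_blok_pos_alt arry blok_w =
      pairsF blok_w (startsF 0 0 arry) (endsF (arry.length : Int) 0 0 arry) := by
  unfold get_white_blok_pos_alt pairsF
  simp only [PySem.List.slice_to_neg_one]
  rw [zip_shift arry 0, starts_eq arry 0 0]
  have hends : (if arry ≠ [] ∧ PySem.List.pyGetD arry (-1) 0 ≠ 0
        then ((PySem.List.enumerate ((0 :: arry).zip arry) 0).filter
            (fun t => decide (t.2.1 ≠ 0 ∧ t.2.2 = 0))).map (·.1) ++ [(arry.length : Int) - 1]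
        else ((PySem.List.enumerate ((0 :: arry).zip arry) 0).filter
            (fun t => decide (t.2.1 ≠ 0 ∧ t.2.2 = 0))).map (·.1))
      = endsF (arry.length : Int) 0 0 arry := by
    rw [← ends_eq arry 0 0 (arry.length : Int)]
    have hlast : arry.getLast?.getD 0 = if arry = [] then 0 else PySem.List.pyGetD arry (-1) 0 := by
      cases h : arry with
      | nil => simp
      | cons a t =>
        simp only [if_neg (List.cons_ne_nil a t)]
        simp [PySem.List.pyGetD, PySem.List.pyGet?, PySem.List.pyIdx?, List.getLast?_eq_getElem?]
    by_cases he : arry = []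
    · subst he; simp
    · rw [hlast, if_neg he]
      by_cases hz : PySem.List.pyGetD arry (-1) 0 ≠ 0 <;> simp [he, hz]
  rw [hends]

-- ===== VERDICT (by name: the statement is the Claim_ definition above) =====
theorem get_white_blok_pos_spec : Claim_equal_get_white_blok_pos := by
  intro arry blok_w _
  unfold Spec_get_white_blok_pos get_white_blok_pos
  rw [alt_eq]
  have h := (aLoop_key blok_w (arry.length : Int) arry).1 [] 0 0 0 (by simp)
  simp only [List.nil_append] at h
  rw [← h]
  rcases hst : aLoop blok_w [] true 0 0 0 arry with ⟨pos, start, x0, x1⟩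
  cases start <;> simp [finalize]
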